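-- pv_equiv track=rewrite | github.com/Akash-S-S/DAA_AAT_1BM22AI008 | cloudy_day.py | maximumPeople
-- ===== SOURCE A (Python) =====
-- def maximumPeople(p, x, y, r):
--     n = len(p)
--     m = len(y)
--
--     events = []
--     for i in range(n):
--         events.append((x[i], 0, i))
--
--     for i in range(m):
--         events.append((y[i] - r[i], -1, i))
--         events.append((y[i] + r[i], 1, i))
--
--     events.sort()
--
--     active_clouds = set()
--     will_add = {}
--     ans = 0
--
--     for event in events:
--         pos, typ, idx = event
--
--         if typ == 1:
--             active_clouds.remove(idx)
--         elif typ == -1: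
--             active_clouds.add(idx)
--         else:
--             if len(active_clouds) == 0:
--                 ans += p[idx]
--             elif len(active_clouds) == 1:
--                 only_cloud = next(iter(active_clouds))
--                 if only_cloud not in will_add:
--                     will_add[only_cloud] = 0
--                 will_add[only_cloud] += p[idx]
--
--     max_add = 0
--     for val in will_add.values():
--         if val > max_add:
--             max_add = val
--
--     return ans + max_add
-- ===== SOURCE B (Python) =====
-- def maximumPeople(p, x, y, r):
--     n = len(p)
--     m = len(y)
--     base = 0
--     tally = {}
--     for i in range(n):
--         cnt = 0
--         last = -1
--         for j in range(m):
--             if y[j] - r[j] <= x[i] <= y[j] + r[j]: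
--                 cnt += 1
--                 last = j
--         if cnt == 0:
--             base += p[i]
--         elif cnt == 1:
--             tally[last] = tally.get(last, 0) + p[i]
--     return base + max([0, *tally.values()])
-- ===== Notes on version B (the rewrite author's own statement) =====
-- stated objective: simpler
-- what changed: Replaced the event-building/sorting sweep-line (tuple events, active-cloud set, dict of pending additions) by a direct double loop: for each person count the clouds covering him inclusively, add to the base when the count is 0 and to a per-cloud tally when it is exactly 1, then add the best tally (clamped at 0).
import Mathlib
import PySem

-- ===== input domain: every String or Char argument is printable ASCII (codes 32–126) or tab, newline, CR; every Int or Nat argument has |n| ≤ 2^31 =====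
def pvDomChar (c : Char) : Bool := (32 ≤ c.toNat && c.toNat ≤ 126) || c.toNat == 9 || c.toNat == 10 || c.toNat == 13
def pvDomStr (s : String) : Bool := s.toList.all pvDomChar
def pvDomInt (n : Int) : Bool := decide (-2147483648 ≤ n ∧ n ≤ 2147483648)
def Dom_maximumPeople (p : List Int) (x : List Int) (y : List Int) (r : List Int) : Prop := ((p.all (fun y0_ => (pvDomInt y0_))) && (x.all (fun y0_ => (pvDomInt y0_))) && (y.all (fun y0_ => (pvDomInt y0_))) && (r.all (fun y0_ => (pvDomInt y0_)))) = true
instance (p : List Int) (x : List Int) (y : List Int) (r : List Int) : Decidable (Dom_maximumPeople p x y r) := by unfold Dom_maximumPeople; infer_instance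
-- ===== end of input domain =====

-- B replaces A's sorted sweep-line (events, active-cloud set, pending-addition dict) by a direct
-- per-person scan over all clouds (simpler, same exact result; not faster).


-- ===== PORT A =====
-- the body of A's event loop ('for event in events: ...'): branches in Python's order.
-- 'next(iter(active))' is ported as headD on the singleton set (order-independent there);
-- 'active_clouds.remove(idx)' is Set.remove?, whose 'none' (Python KeyError) is excluded by Pre_;
-- 'if only not in will_add: will_add[only] = 0' is exactly dict.setdefault, then 'will_add[only] += p[idx]' is modify.
def stepA (p : List Int) (st : PySem.Set Int × PySem.Dict Int Int × Int) (e : Int × Int × Int) :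
    PySem.Set Int × PySem.Dict Int Int × Int :=
  if e.2.1 = 1 then ((PySem.Set.remove? st.1 e.2.2).getD st.1, st.2.1, st.2.2)
  else if e.2.1 = -1 then (PySem.Set.add st.1 e.2.2, st.2.1, st.2.2)
  else if PySem.List.len st.1 = 0 then (st.1, st.2.1, st.2.2 + PySem.List.pyGetD p e.2.2 0)
  else if PySem.List.len st.1 = 1 then
    (st.1, ((st.2.1.setdefault (st.1.headD 0) 0).modify (st.1.headD 0) 0
             (· + PySem.List.pyGetD p e.2.2 0)), st.2.2)
  else st

-- events.sort() on (pos, typ, idx) triples: ported as the stable sort on the key (pos, typ);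
-- within each (pos, typ) tie class all events have the same typ and were appended in increasing idx,
-- so the stable sort on (pos, typ) produces exactly Python's (pos, typ, idx) order.
def maximumPeople (p : List Int) (x : List Int) (y : List Int) (r : List Int) : Int :=
  let n := PySem.List.len p
  let m := PySem.List.len y
  let ev1 := (PySem.List.pyRange 0 n 1).foldl
    (fun acc i => acc ++ [(PySem.List.pyGetD x i 0, (0 : Int), i)]) []
  let ev2 := (PySem.List.pyRange 0 m 1).foldl
    (fun acc i =>
      (acc ++ [(PySem.List.pyGetD y i 0 - PySem.List.pyGetD r i 0, (-1 : Int), i)]) ++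
        [(PySem.List.pyGetD y i 0 + PySem.List.pyGetD r i 0, (1 : Int), i)]) ev1
  let evs := PySem.List.sorted2 ev2 (fun e => e.1) (fun e => e.2.1)
  let st := evs.foldl (stepA p) ([], PySem.Dict.empty, 0)
  st.2.2 + st.2.1.values.foldl (fun mx v => if v > mx then v else mx) 0

-- ===== PORT B =====
-- body of B's outer loop: scan all clouds for person i, then update base / tally.
def stepB (p : List Int) (x : List Int) (y : List Int) (r : List Int)
    (st : Int × PySem.Dict Int Int) (i : Int) : Int × PySem.Dict Int Int :=
  let cl := (PySem.List.pyRange 0 (PySem.List.len y) 1).foldl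
    (fun (cl : Int × Int) j =>
      if PySem.List.pyGetD y j 0 - PySem.List.pyGetD r j 0 ≤ PySem.List.pyGetD x i 0 ∧
         PySem.List.pyGetD x i 0 ≤ PySem.List.pyGetD y j 0 + PySem.List.pyGetD r j 0
      then (cl.1 + 1, j) else cl) (0, -1)
  if cl.1 = 0 then (st.1 + PySem.List.pyGetD p i 0, st.2)
  else if cl.1 = 1 then (st.1, st.2.insert cl.2 (st.2.getD cl.2 0 + PySem.List.pyGetD p i 0))
  else st

def maximumPeople_alt (p : List Int) (x : List Int) (y : List Int) (r : List Int) : Int :=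
  let st := (PySem.List.pyRange 0 (PySem.List.len p) 1).foldl (stepB p x y r) (0, PySem.Dict.empty)
  st.1 + (PySem.List.max? ((0 : Int) :: st.2.values) (fun v => v)).getD 0

-- ===== PRECONDITION & SPEC =====
-- Pre_ excludes exactly the inputs where Python A raises: x shorter than p or r shorter than y
-- (IndexError), and a negative radius among r[0:len(y)] (KeyError in the sweep).
def Pre_maximumPeople (p : List Int) (x : List Int) (y : List Int) (r : List Int) : Prop :=
  p.length ≤ x.length ∧ y.length ≤ r.length ∧ ∀ a ∈ r.take y.length, 0 ≤ a
instance (p : List Int) (x : List Int) (y : List Int) (r : List Int) :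
    Decidable (Pre_maximumPeople p x y r) := by unfold Pre_maximumPeople; infer_instance

def pvWitness_maximumPeople : List Int × List Int × List Int × List Int :=
  ([3, 7], [1, 5], [2], [1])

def Spec_maximumPeople (p : List Int) (x : List Int) (y : List Int) (r : List Int) (out : Int) :
    Prop := out = maximumPeople_alt p x y r
instance (p : List Int) (x : List Int) (y : List Int) (r : List Int) (out : Int) :
    Decidable (Spec_maximumPeople p x y r out) := by unfold Spec_maximumPeople; infer_instance

-- ===== CLAIM (what is proved, stated in full; the proofs are below) =====
def Claim_equal_maximumPeople : Prop := ∀ (p : List Int) (x : List Int) (y : List Int) (r : List Int), Dom_maximumPeople p x y r → Pre_maximumPeople p x y r → Spec_maximumPeople p x y r (maximumPeople p x y r)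

-- ===== LEMMAS AND PROOFS =====

-- Boolean 'sort before' relation of the (pos, typ) key, as sorted2 uses it.
def pvEvB (a b : Int × Int × Int) : Bool :=
  decide (a.1 < b.1) || (!decide (b.1 < a.1) && decide (a.2.1 < b.2.1))

-- 'a need not come after b': the weak order sorted2's output is Pairwise in.
def pvR (a b : Int × Int × Int) : Prop := pvEvB b a = false

-- the three event shapes
def pvPev (x : List Int) (i : Int) : Int × Int × Int := (PySem.List.pyGetD x i 0, 0, i)
def pvSev (y r : List Int) (j : Int) : Int × Int × Int :=
  (PySem.List.pyGetD y j 0 - PySem.List.pyGetD r j 0, -1, j)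
def pvEev (y r : List Int) (j : Int) : Int × Int × Int :=
  (PySem.List.pyGetD y j 0 + PySem.List.pyGetD r j 0, 1, j)

-- the unsorted event list A builds
def pvE0 (p x y r : List Int) : List (Int × Int × Int) :=
  (PySem.List.pyRange 0 (PySem.List.len p) 1).map (pvPev x) ++
    (PySem.List.pyRange 0 (PySem.List.len y) 1).flatMap (fun j => [pvSev y r j, pvEev y r j])

-- clouds (indices) covering position v, in increasing order
def pvCov (y r : List Int) (v : Int) : List Int :=
  (PySem.List.pyRange 0 (PySem.List.len y) 1).filter
    (fun j => decide (PySem.List.pyGetD y j 0 - PySem.List.pyGetD r j 0 ≤ v ∧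
                      v ≤ PySem.List.pyGetD y j 0 + PySem.List.pyGetD r j 0))

-- running quantities of A's sweep, as functions of the processed prefix P
def pvAns (p x y r : List Int) (P : List (Int × Int × Int)) : Int :=
  ((PySem.List.pyRange 0 (PySem.List.len p) 1).map
    (fun i => if pvPev x i ∈ P ∧ pvCov y r (PySem.List.pyGetD x i 0) = []
              then PySem.List.pyGetD p i 0 else 0)).sum

def pvTal (p x y r : List Int) (P : List (Int × Int × Int)) (k : Int) : Int :=
  ((PySem.List.pyRange 0 (PySem.List.len p) 1).map
    (fun i => if pvPev x i ∈ P ∧ pvCov y r (PySem.List.pyGetD x i 0) = [k]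
              then PySem.List.pyGetD p i 0 else 0)).sum

def pvKey (p x y r : List Int) (P : List (Int × Int × Int)) (k : Int) : Prop :=
  ∃ i, i ∈ PySem.List.pyRange 0 (PySem.List.len p) 1 ∧ pvPev x i ∈ P ∧
       pvCov y r (PySem.List.pyGetD x i 0) = [k]

-- B's quantities, as functions of how many persons were processed
def pvAnsN (p x y r : List Int) (N : Int) : Int :=
  ((PySem.List.pyRange 0 N 1).map
    (fun i => if pvCov y r (PySem.List.pyGetD x i 0) = []
              then PySem.List.pyGetD p i 0 else 0)).sum

def pvTalN (p x y r : List Int) (N : Int) (k : Int) : Int :=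
  ((PySem.List.pyRange 0 N 1).map
    (fun i => if pvCov y r (PySem.List.pyGetD x i 0) = [k]
              then PySem.List.pyGetD p i 0 else 0)).sum


lemma pvEvB_true (a b : Int × Int × Int) :
    pvEvB a b = true ↔ a.1 < b.1 ∨ (a.1 = b.1 ∧ a.2.1 < b.2.1) := by
  simp [pvEvB]; omega

lemma pvEvB_false (a b : Int × Int × Int) :
    pvEvB a b = false ↔ (b.1 < a.1 ∨ (b.1 = a.1 ∧ b.2.1 ≤ a.2.1)) := by
  rw [← Bool.not_eq_true, pvEvB_true]; omega

lemma pvInsertBy_pairwise (z : Int × Int × Int) (ys : List (Int × Int × Int))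
    (h : ys.Pairwise pvR) : (PySem.List.insertBy pvEvB z ys).Pairwise pvR := by
  induction ys with
  | nil => simp [PySem.List.insertBy, pvR]
  | cons w t ih =>
    rw [List.pairwise_cons] at h
    rw [PySem.List.insertBy]
    by_cases hb : pvEvB z w = true
    · rw [if_pos hb]
      refine List.pairwise_cons.mpr ⟨?_, List.pairwise_cons.mpr h⟩
      intro b hbmem
      rcases List.mem_cons.mp hbmem with rfl | hbt
      · show pvEvB b z = false
        rw [pvEvB_false]; rw [pvEvB_true] at hb; omega
      · show pvEvB b z = false
        have h1 : pvEvB b w = false := h.1 b hbt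
        rw [pvEvB_false] at h1 ⊢; rw [pvEvB_true] at hb; omega
    · rw [if_neg hb]
      refine List.pairwise_cons.mpr ⟨?_, ih h.2⟩
      intro b hbmem
      rcases (PySem.List.insertBy_mem_iff _ _ _ _).mp hbmem with rfl | hbt
      · show pvEvB b w = false
        exact Bool.eq_false_iff.mpr (fun hc => hb hc)
      · exact h.1 b hbt

lemma pvSorted2_pairwise (l : List (Int × Int × Int)) :
    (PySem.List.sorted2 l (fun e => e.1) (fun e => e.2.1)).Pairwise pvR := by
  have hrfl : PySem.List.sorted2 l (fun e => e.1) (fun e => e.2.1) =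
      l.foldl (fun acc z => PySem.List.insertBy pvEvB z acc) [] := rfl
  rw [hrfl]
  suffices hgen : ∀ (l acc : List (Int × Int × Int)),
      acc.Pairwise pvR → (l.foldl (fun acc z => PySem.List.insertBy pvEvB z acc) acc).Pairwise pvR by
    exact hgen l [] (by simp)
  intro l
  induction l with
  | nil => intro acc h; simpa using h
  | cons z t ih => intro acc h; exact ih _ (pvInsertBy_pairwise z acc h)

lemma pvPev_mem_E0 (p x y r : List Int) {i : Int}
    (hi : i ∈ PySem.List.pyRange 0 (PySem.List.len p) 1) : pvPev x i ∈ pvE0 p x y r := by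
  unfold pvE0
  exact List.mem_append.mpr (Or.inl (List.mem_map.mpr ⟨i, hi, rfl⟩))

lemma pvSev_mem_E0 (p x y r : List Int) {j : Int}
    (hj : j ∈ PySem.List.pyRange 0 (PySem.List.len y) 1) : pvSev y r j ∈ pvE0 p x y r := by
  unfold pvE0
  refine List.mem_append.mpr (Or.inr (List.mem_flatMap.mpr ⟨j, hj, ?_⟩))
  simp

lemma pvEev_mem_E0 (p x y r : List Int) {j : Int}
    (hj : j ∈ PySem.List.pyRange 0 (PySem.List.len y) 1) : pvEev y r j ∈ pvE0 p x y r := by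
  unfold pvE0
  refine List.mem_append.mpr (Or.inr (List.mem_flatMap.mpr ⟨j, hj, ?_⟩))
  simp

lemma pvE0_cases (p x y r : List Int) {e : Int × Int × Int} (he : e ∈ pvE0 p x y r) :
    (∃ i, i ∈ PySem.List.pyRange 0 (PySem.List.len p) 1 ∧ e = pvPev x i) ∨
    (∃ j, j ∈ PySem.List.pyRange 0 (PySem.List.len y) 1 ∧ e = pvSev y r j) ∨
    (∃ j, j ∈ PySem.List.pyRange 0 (PySem.List.len y) 1 ∧ e = pvEev y r j) := by
  unfold pvE0 at he
  rcases List.mem_append.mp he with h | h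
  · rcases List.mem_map.mp h with ⟨i, hi, rfl⟩
    exact Or.inl ⟨i, hi, rfl⟩
  · rcases List.mem_flatMap.mp h with ⟨j, hj, hmem⟩
    rcases List.mem_cons.mp hmem with rfl | hmem
    · exact Or.inr (Or.inl ⟨j, hj, rfl⟩)
    · rcases List.mem_cons.mp hmem with rfl | hmem
      · exact Or.inr (Or.inr ⟨j, hj, rfl⟩)
      · simp at hmem

lemma pvE0_nodup (p x y r : List Int) : (pvE0 p x y r).Nodup := by
  unfold pvE0
  refine List.nodup_append.mpr ⟨?_, ?_, ?_⟩
  · refine List.Nodup.map ?_ (PySem.List.nodup_pyRange_one _ _)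
    intro a b hab
    simpa [pvPev] using congrArg (fun e => e.2.2) hab
  · refine List.nodup_flatMap.mpr ⟨?_, ?_⟩
    · intro j _; simp [pvSev, pvEev]
    · refine List.Pairwise.imp ?_ (PySem.List.pairwise_lt_pyRange_one 0 (PySem.List.len y))
      intro a b hab
      intro e he1 he2
      simp only [List.mem_cons, List.not_mem_nil, or_false] at he1 he2
      rcases he1 with rfl | rfl <;> rcases he2 with h | h <;>
        · have := congrArg (fun e => e.2.2) h
          simp [pvSev, pvEev] at this; omega
  · intro a ha b hb
    rcases List.mem_map.mp ha with ⟨i, _, rfl⟩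
    rcases List.mem_flatMap.mp hb with ⟨j, _, hmem⟩
    simp only [List.mem_cons, List.not_mem_nil, or_false] at hmem
    rcases hmem with rfl | rfl <;>
      · intro h
        have := congrArg (fun e => e.2.1) h
        simp [pvPev, pvSev, pvEev] at this


lemma pvSum_update (l : List Int) (f g : Int → Int) (i0 : Int) (hnd : l.Nodup)
    (hmem : i0 ∈ l) (h : ∀ i ∈ l, i ≠ i0 → g i = f i) :
    (l.map g).sum = (l.map f).sum + (g i0 - f i0) := by
  induction l with
  | nil => simp at hmem
  | cons a t ih =>
    rw [List.nodup_cons] at hnd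
    rcases List.mem_cons.mp hmem with rfl | hit
    · have htcongr : t.map g = t.map f := by
        refine List.map_congr_left ?_
        intro i hi
        exact h i (List.mem_cons_of_mem _ hi) (fun hia => hnd.1 (hia ▸ hi))
      simp only [List.map_cons, List.sum_cons, htcongr]
      ring
    · have ha : g a = f a := h a (List.mem_cons_self) (fun haa => hnd.1 (haa ▸ hit))
      have := ih hnd.2 hit (fun i hi hine => h i (List.mem_cons_of_mem _ hi) hine)
      simp only [List.map_cons, List.sum_cons, this, ha]
      ring

lemma pvPev_notmem_cloudapp (x : List Int) (i : Int) {e : Int × Int × Int}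
    (he : e.2.1 ≠ 0) (P : List (Int × Int × Int)) :
    (pvPev x i ∈ P ++ [e]) ↔ pvPev x i ∈ P := by
  rw [List.mem_append, List.mem_singleton]
  constructor
  · rintro (h | h)
    · exact h
    · exact absurd (congrArg (fun e => e.2.1) h).symm (by simpa [pvPev] using he)
  · exact Or.inl

lemma pvAns_cloudapp (p x y r : List Int) (P : List (Int × Int × Int))
    {e : Int × Int × Int} (he : e.2.1 ≠ 0) :
    pvAns p x y r (P ++ [e]) = pvAns p x y r P := by
  unfold pvAns
  refine congrArg _ (List.map_congr_left ?_)
  intro i _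
  simp only [pvPev_notmem_cloudapp x i he P]

lemma pvTal_cloudapp (p x y r : List Int) (P : List (Int × Int × Int))
    {e : Int × Int × Int} (he : e.2.1 ≠ 0) (k : Int) :
    pvTal p x y r (P ++ [e]) k = pvTal p x y r P k := by
  unfold pvTal
  refine congrArg _ (List.map_congr_left ?_)
  intro i _
  simp only [pvPev_notmem_cloudapp x i he P]

lemma pvKey_cloudapp (p x y r : List Int) (P : List (Int × Int × Int))
    {e : Int × Int × Int} (he : e.2.1 ≠ 0) (k : Int) :
    pvKey p x y r (P ++ [e]) k ↔ pvKey p x y r P k := by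
  unfold pvKey
  refine exists_congr fun i => ?_
  rw [pvPev_notmem_cloudapp x i he P]

lemma pvPev_inj (x : List Int) {i i' : Int} (h : pvPev x i = pvPev x i') : i = i' := by
  simpa [pvPev] using congrArg (fun e => e.2.2) h

lemma pvAns_persapp (p x y r : List Int) (P : List (Int × Int × Int)) {i0 : Int}
    (hi0 : i0 ∈ PySem.List.pyRange 0 (PySem.List.len p) 1) (hnot : pvPev x i0 ∉ P) :
    pvAns p x y r (P ++ [pvPev x i0]) = pvAns p x y r P +
      (if pvCov y r (PySem.List.pyGetD x i0 0) = [] then PySem.List.pyGetD p i0 0 else 0) := by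
  unfold pvAns
  rw [pvSum_update _ (fun i => if pvPev x i ∈ P ∧ pvCov y r (PySem.List.pyGetD x i 0) = []
        then PySem.List.pyGetD p i 0 else 0) _ i0 (PySem.List.nodup_pyRange_one _ _) hi0 ?_]
  · have h1 : pvPev x i0 ∈ P ++ [pvPev x i0] := by simp
    have h2 : (if pvPev x i0 ∈ P ∧ pvCov y r (PySem.List.pyGetD x i0 0) = []
               then PySem.List.pyGetD p i0 0 else 0) = 0 := if_neg (fun hc => hnot hc.1)
    have h3 : (if pvPev x i0 ∈ P ++ [pvPev x i0] ∧ pvCov y r (PySem.List.pyGetD x i0 0) = []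
               then PySem.List.pyGetD p i0 0 else 0) =
              (if pvCov y r (PySem.List.pyGetD x i0 0) = []
               then PySem.List.pyGetD p i0 0 else 0) := by simp only [h1, true_and]
    rw [h2, h3]; ring
  · intro i _ hine
    have hme : (pvPev x i ∈ P ++ [pvPev x i0]) ↔ pvPev x i ∈ P := by
      rw [List.mem_append, List.mem_singleton]
      constructor
      · rintro (h | h)
        · exact h
        · exact absurd (pvPev_inj x h) hine
      · exact Or.inl
    simp only [hme]

lemma pvTal_persapp (p x y r : List Int) (P : List (Int × Int × Int)) {i0 : Int}
    (hi0 : i0 ∈ PySem.List.pyRange 0 (PySem.List.len p) 1) (hnot : pvPev x i0 ∉ P) (k : Int) :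
    pvTal p x y r (P ++ [pvPev x i0]) k = pvTal p x y r P k +
      (if pvCov y r (PySem.List.pyGetD x i0 0) = [k] then PySem.List.pyGetD p i0 0 else 0) := by
  unfold pvTal
  rw [pvSum_update _ (fun i => if pvPev x i ∈ P ∧ pvCov y r (PySem.List.pyGetD x i 0) = [k]
        then PySem.List.pyGetD p i 0 else 0) _ i0 (PySem.List.nodup_pyRange_one _ _) hi0 ?_]
  · have h1 : pvPev x i0 ∈ P ++ [pvPev x i0] := by simp
    have h2 : (if pvPev x i0 ∈ P ∧ pvCov y r (PySem.List.pyGetD x i0 0) = [k]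
               then PySem.List.pyGetD p i0 0 else 0) = 0 := if_neg (fun hc => hnot hc.1)
    have h3 : (if pvPev x i0 ∈ P ++ [pvPev x i0] ∧ pvCov y r (PySem.List.pyGetD x i0 0) = [k]
               then PySem.List.pyGetD p i0 0 else 0) =
              (if pvCov y r (PySem.List.pyGetD x i0 0) = [k]
               then PySem.List.pyGetD p i0 0 else 0) := by simp only [h1, true_and]
    rw [h2, h3]; ring
  · intro i _ hine
    have hme : (pvPev x i ∈ P ++ [pvPev x i0]) ↔ pvPev x i ∈ P := by
      rw [List.mem_append, List.mem_singleton]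
      constructor
      · rintro (h | h)
        · exact h
        · exact absurd (pvPev_inj x h) hine
      · exact Or.inl
    simp only [hme]

lemma pvKey_persapp (p x y r : List Int) (P : List (Int × Int × Int)) {i0 : Int}
    (hi0 : i0 ∈ PySem.List.pyRange 0 (PySem.List.len p) 1) (k : Int) :
    pvKey p x y r (P ++ [pvPev x i0]) k ↔
      (pvKey p x y r P k ∨ pvCov y r (PySem.List.pyGetD x i0 0) = [k]) := by
  unfold pvKey
  constructor
  · rintro ⟨i, hi, hmem, hcov⟩
    rcases List.mem_append.mp hmem with h | h
    · exact Or.inl ⟨i, hi, h, hcov⟩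
    · rw [List.mem_singleton] at h
      have := pvPev_inj x h
      subst this
      exact Or.inr hcov
  · rintro (⟨i, hi, hmem, hcov⟩ | hcov)
    · exact ⟨i, hi, List.mem_append.mpr (Or.inl hmem), hcov⟩
    · exact ⟨i0, hi0, by simp, hcov⟩

lemma pvMem_P_iff (p x y r : List Int) (P S : List (Int × Int × Int)) (e : Int × Int × Int)
    (hperm : (P ++ e :: S).Perm (pvE0 p x y r)) (hpw : (P ++ e :: S).Pairwise pvR)
    (ev : Int × Int × Int) (hev : ev ∈ pvE0 p x y r)
    (hkey : ¬(ev.1 = e.1 ∧ ev.2.1 = e.2.1)) :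
    ev ∈ P ↔ pvEvB ev e = true := by
  rcases List.pairwise_append.mp hpw with ⟨_, hpwS, hcross⟩
  constructor
  · intro hmem
    have h1 : pvR ev e := hcross ev hmem e (List.mem_cons_self)
    unfold pvR at h1
    rw [pvEvB_false] at h1
    rw [pvEvB_true]
    omega
  · intro htrue
    have hm : ev ∈ P ++ e :: S := hperm.mem_iff.mpr hev
    rcases List.mem_append.mp hm with h | h
    · exact h
    · rcases List.mem_cons.mp h with rfl | h
      · rw [pvEvB_true] at htrue; omega
      · have h1 : pvR e ev := (List.pairwise_cons.mp hpwS).1 ev h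
        unfold pvR at h1
        rw [htrue] at h1
        exact absurd h1 (by simp)


lemma pvSev_ne_pev (y r x : List Int) (j i : Int) : pvSev y r j ≠ pvPev x i := by
  intro h
  exact absurd (congrArg (fun e => e.2.1) h) (by simp [pvSev, pvPev])

lemma pvEev_ne_pev (y r x : List Int) (j i : Int) : pvEev y r j ≠ pvPev x i := by
  intro h
  exact absurd (congrArg (fun e => e.2.1) h) (by simp [pvEev, pvPev])

lemma pvEev_ne_sev (y r y' r' : List Int) (j j' : Int) : pvEev y r j ≠ pvSev y' r' j' := by
  intro h
  exact absurd (congrArg (fun e => e.2.1) h) (by simp [pvEev, pvSev])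

lemma pvFoldA (p x y r : List Int)
    (hsr : ∀ j ∈ PySem.List.pyRange 0 (PySem.List.len y) 1, 0 ≤ PySem.List.pyGetD r j 0) :
    ∀ (S P : List (Int × Int × Int)) (act : PySem.Set Int) (wa : PySem.Dict Int Int) (ans : Int),
    (P ++ S).Perm (pvE0 p x y r) →
    (P ++ S).Pairwise pvR →
    (∀ j : Int, j ∈ act ↔ (j ∈ PySem.List.pyRange 0 (PySem.List.len y) 1 ∧
        pvSev y r j ∈ P ∧ pvEev y r j ∉ P)) →
    act.Nodup →
    ans = pvAns p x y r P →
    (∀ k, wa.getD k 0 = pvTal p x y r P k) →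
    (∀ k, k ∈ wa.keys ↔ pvKey p x y r P k) →
    wa.keys.Nodup →
    ((S.foldl (stepA p) (act, wa, ans)).2.2 = pvAns p x y r (P ++ S) ∧
     (∀ k, (S.foldl (stepA p) (act, wa, ans)).2.1.getD k 0 = pvTal p x y r (P ++ S) k) ∧
     (∀ k, k ∈ (S.foldl (stepA p) (act, wa, ans)).2.1.keys ↔ pvKey p x y r (P ++ S) k) ∧
     (S.foldl (stepA p) (act, wa, ans)).2.1.keys.Nodup) := by
  intro S
  induction S with
  | nil =>
    intro P act wa ans hperm hpw hact hactnd hans htal hkey hknd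
    simp only [List.foldl_nil, List.append_nil]
    exact ⟨hans, htal, hkey, hknd⟩
  | cons e S ih =>
    intro P act wa ans hperm hpw hact hactnd hans htal hkey hknd
    have hndE : (pvE0 p x y r).Nodup := pvE0_nodup p x y r
    have hndPS : (P ++ e :: S).Nodup := hperm.nodup_iff.mpr hndE
    have heP : e ∉ P := by
      rcases List.nodup_append.mp hndPS with ⟨_, _, hdisj⟩
      intro hc
      exact hdisj _ hc _ (List.mem_cons_self) rfl
    have heE : e ∈ pvE0 p x y r := hperm.mem_iff.mp (by simp)
    have hassoc : P ++ e :: S = (P ++ [e]) ++ S := by simp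
    rw [List.foldl_cons, hassoc]
    have hperm' : ((P ++ [e]) ++ S).Perm (pvE0 p x y r) := by rwa [← hassoc]
    have hpw' : ((P ++ [e]) ++ S).Pairwise pvR := by rwa [← hassoc]
    rcases pvE0_cases p x y r heE with ⟨i, hi, rfl⟩ | ⟨j, hj, rfl⟩ | ⟨j, hj, rfl⟩
    · -- person event
      have hpersnot : pvPev x i ∉ P := heP
      have hact' : ∀ j' : Int, j' ∈ act ↔ (j' ∈ PySem.List.pyRange 0 (PySem.List.len y) 1 ∧
          pvSev y r j' ∈ P ++ [pvPev x i] ∧ pvEev y r j' ∉ P ++ [pvPev x i]) := by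
        intro j'
        rw [hact j']
        have h1 : pvSev y r j' ∈ P ++ [pvPev x i] ↔ pvSev y r j' ∈ P := by
          rw [List.mem_append, List.mem_singleton]
          exact ⟨fun h => h.resolve_right (fun hc => absurd hc (pvSev_ne_pev y r x j' i)),
                 Or.inl⟩
        have h2 : pvEev y r j' ∈ P ++ [pvPev x i] ↔ pvEev y r j' ∈ P := by
          rw [List.mem_append, List.mem_singleton]
          exact ⟨fun h => h.resolve_right (fun hc => absurd hc (pvEev_ne_pev y r x j' i)),
                 Or.inl⟩
        rw [h1, h2]
      have hmemact : ∀ j' : Int, j' ∈ act ↔ j' ∈ pvCov y r (PySem.List.pyGetD x i 0) := by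
        intro j'
        rw [hact j']
        simp only [pvCov, List.mem_filter, decide_eq_true_eq]
        constructor
        · rintro ⟨hrange, hs, he⟩
          have hs1 : pvEvB (pvSev y r j') (pvPev x i) = true :=
            (pvMem_P_iff p x y r P S _ hperm hpw _ (pvSev_mem_E0 p x y r hrange)
              (by simp [pvSev, pvPev])).mp hs
          have he1 : pvEvB (pvEev y r j') (pvPev x i) = false := by
            rcases Bool.eq_false_or_eq_true (pvEvB (pvEev y r j') (pvPev x i)) with h | h
            · exact absurd ((pvMem_P_iff p x y r P S _ hperm hpw _
                (pvEev_mem_E0 p x y r hrange) (by simp [pvEev, pvPev])).mpr h) he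
            · exact h
          rw [pvEvB_true] at hs1
          rw [pvEvB_false] at he1
          simp only [pvSev, pvEev, pvPev] at hs1 he1
          exact ⟨hrange, by constructor <;> omega⟩
        · rintro ⟨hrange, hc1, hc2⟩
          refine ⟨hrange, ?_, ?_⟩
          · refine (pvMem_P_iff p x y r P S _ hperm hpw _ (pvSev_mem_E0 p x y r hrange)
              (by simp [pvSev, pvPev])).mpr ?_
            rw [pvEvB_true]
            simp only [pvSev, pvPev]
            omega
          · intro hc
            have := (pvMem_P_iff p x y r P S _ hperm hpw _ (pvEev_mem_E0 p x y r hrange)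
              (by simp [pvEev, pvPev])).mp hc
            rw [pvEvB_true] at this
            simp only [pvEev, pvPev] at this
            omega
      have hcovnd : (pvCov y r (PySem.List.pyGetD x i 0)).Nodup :=
        (PySem.List.nodup_pyRange_one _ _).filter _
      have hlen : act.length = (pvCov y r (PySem.List.pyGetD x i 0)).length :=
        ((List.perm_ext_iff_of_nodup hactnd hcovnd).mpr hmemact).length_eq
      rcases hc0 : (pvCov y r (PySem.List.pyGetD x i 0)).length with _ | nc
      · -- no cloud covers: ans += p[i]
        have hcove : pvCov y r (PySem.List.pyGetD x i 0) = [] :=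
          List.length_eq_zero_iff.mp hc0
        have hstep : stepA p (act, wa, ans) (pvPev x i) =
            (act, wa, ans + PySem.List.pyGetD p i 0) := by
          simp [stepA, pvPev, PySem.List.len, hlen, hc0]
        rw [hstep]
        refine ih (P ++ [pvPev x i]) act wa _ hperm' hpw' hact' hactnd ?_ ?_ ?_ hknd
        · rw [pvAns_persapp p x y r P hi hpersnot, if_pos hcove, hans]
        · intro k
          rw [pvTal_persapp p x y r P hi hpersnot k, htal k, hcove]
          simp
        · intro k
          rw [pvKey_persapp p x y r P hi k, hcove]
          simp [hkey k]
      · rcases nc with _ | nc2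
        · -- exactly one cloud k0
          rcases List.length_eq_one_iff.mp hc0 with ⟨k0, hcove⟩
          rcases List.length_eq_one_iff.mp (hlen.trans hc0) with ⟨a0, hacte⟩
          have ha0 : a0 = k0 := by
            have : a0 ∈ pvCov y r (PySem.List.pyGetD x i 0) :=
              (hmemact a0).mp (by simp [hacte])
            rw [hcove] at this
            simpa using this
          have hstep : stepA p (act, wa, ans) (pvPev x i) =
              (act, (wa.setdefault k0 0).modify k0 0 (· + PySem.List.pyGetD p i 0), ans) := by
            simp [stepA, pvPev, PySem.List.len, hacte, ha0]
          rw [hstep]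
          refine ih (P ++ [pvPev x i]) act _ _ hperm' hpw' hact' hactnd ?_ ?_ ?_ ?_
          · rw [pvAns_persapp p x y r P hi hpersnot, hcove, hans]
            simp
          · intro k
            rw [pvTal_persapp p x y r P hi hpersnot k, hcove]
            by_cases hk : k = k0
            · subst hk
              rw [PySem.Dict.getD_modify_self, PySem.Dict.getD_setdefault_self, htal k]
              simp
            · rw [PySem.Dict.getD_modify_of_ne _ _ _ hk,
                  PySem.Dict.getD_eq_get?_getD, PySem.Dict.get?_setdefault_of_ne _ _ hk,
                  ← PySem.Dict.getD_eq_get?_getD, htal k]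
              have hns : ¬([k0] = [k]) := by
                intro h
                injection h with h1 _
                exact hk h1.symm
              simp [hns]
          · intro k
            rw [PySem.Dict.keys_modify, PySem.Dict.mem_keys_insert,
                pvKey_persapp p x y r P hi k, hcove, PySem.Dict.keys_setdefault]
            have hsing : ([k0] = [k]) ↔ k = k0 := by
              constructor
              · intro h; simpa using h.symm
              · intro h; simp [h]
            rw [hsing]
            by_cases hc : wa.contains k0 = true
            · rw [if_pos hc, hkey k]
              exact or_comm
            · rw [if_neg hc, List.mem_append, List.mem_singleton, hkey k]
              tauto
          · rw [PySem.Dict.keys_modify]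
            refine PySem.Dict.nodup_keys_insert _ _ _ ?_
            rw [PySem.Dict.keys_setdefault]
            by_cases hc : wa.contains k0 = true
            · rw [if_pos hc]; exact hknd
            · rw [if_neg hc, List.nodup_append]
              refine ⟨hknd, List.nodup_singleton _, ?_⟩
              intro a ha b hb
              rw [List.mem_singleton] at hb
              subst hb
              rintro rfl
              exact hc ((PySem.Dict.contains_iff_mem_keys wa a).mpr ha)
        · -- two or more clouds: nothing happens
          have hstep : stepA p (act, wa, ans) (pvPev x i) = (act, wa, ans) := by
            have h1 : act ≠ [] := by
              intro hc
              rw [hc] at hlen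
              simp [hc0] at hlen
            have h2 : act.length ≠ 1 := by omega
            simp [stepA, pvPev, PySem.List.len, h1, h2]
          rw [hstep]
          have hne0 : pvCov y r (PySem.List.pyGetD x i 0) ≠ [] := by
            intro hc; rw [hc] at hc0; simp at hc0
          have hne1 : ∀ k : Int, pvCov y r (PySem.List.pyGetD x i 0) ≠ [k] := by
            intro k hc; rw [hc] at hc0; simp at hc0
          refine ih (P ++ [pvPev x i]) act wa _ hperm' hpw' hact' hactnd ?_ ?_ ?_ hknd
          · rw [pvAns_persapp p x y r P hi hpersnot, if_neg hne0, hans]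
            ring
          · intro k
            rw [pvTal_persapp p x y r P hi hpersnot k, if_neg (hne1 k), htal k]
            ring
          · intro k
            rw [pvKey_persapp p x y r P hi k]
            simp [hkey k, hne1 k]
    · -- cloud start event
      have hstep : stepA p (act, wa, ans) (pvSev y r j) = (PySem.Set.add act j, wa, ans) := by
        simp [stepA, pvSev]
      rw [hstep]
      have heevP : pvEev y r j ∉ P := by
        intro hc
        rcases List.pairwise_append.mp hpw with ⟨_, _, hcross⟩
        have h1 : pvR (pvEev y r j) (pvSev y r j) := hcross _ hc _ (List.mem_cons_self)
        unfold pvR at h1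
        rw [pvEvB_false] at h1
        simp only [pvSev, pvEev] at h1
        have := hsr j hj
        omega
      have hact' : ∀ j' : Int, j' ∈ PySem.Set.add act j ↔
          (j' ∈ PySem.List.pyRange 0 (PySem.List.len y) 1 ∧
           pvSev y r j' ∈ P ++ [pvSev y r j] ∧ pvEev y r j' ∉ P ++ [pvSev y r j]) := by
        intro j'
        rw [PySem.Set.mem_add, hact j', List.mem_append, List.mem_singleton,
            List.mem_append, List.mem_singleton]
        constructor
        · rintro (⟨hr, hs, he⟩ | rfl)
          · refine ⟨hr, Or.inl hs, ?_⟩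
            rintro (hc | hc)
            · exact he hc
            · exact absurd hc (pvEev_ne_sev y r y r j' j)
          · refine ⟨hj, Or.inr rfl, ?_⟩
            rintro (hc | hc)
            · exact heevP hc
            · exact absurd hc (pvEev_ne_sev _ _ _ _ _ _)
        · rintro ⟨hr, hs | hs, he⟩
          · exact Or.inl ⟨hr, hs, fun hc => he (Or.inl hc)⟩
          · have : j' = j := by simpa [pvSev] using congrArg (fun e => e.2.2) hs
            exact Or.inr this
      refine ih (P ++ [pvSev y r j]) _ wa _ hperm' hpw' hact'
        (PySem.Set.nodup_add act j hactnd) ?_ ?_ ?_ hknd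
      · rw [pvAns_cloudapp p x y r P (e := pvSev y r j) (by simp [pvSev]), hans]
      · intro k
        rw [pvTal_cloudapp p x y r P (e := pvSev y r j) (by simp [pvSev]) k, htal k]
      · intro k
        rw [pvKey_cloudapp p x y r P (e := pvSev y r j) (by simp [pvSev]) k]
        exact hkey k
    · -- cloud end event
      have hsevP : pvSev y r j ∈ P := by
        refine (pvMem_P_iff p x y r P S _ hperm hpw _ (pvSev_mem_E0 p x y r hj)
          (by simp [pvSev, pvEev])).mpr ?_
        rw [pvEvB_true]
        simp only [pvSev, pvEev]
        have := hsr j hj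
        omega
      have hjact : j ∈ act := (hact j).mpr ⟨hj, hsevP, heP⟩
      have hstep : stepA p (act, wa, ans) (pvEev y r j) = (act.discard j, wa, ans) := by
        simp [stepA, pvEev, PySem.Set.remove?_of_mem hjact]
      rw [hstep]
      have hact' : ∀ j' : Int, j' ∈ act.discard j ↔
          (j' ∈ PySem.List.pyRange 0 (PySem.List.len y) 1 ∧
           pvSev y r j' ∈ P ++ [pvEev y r j] ∧ pvEev y r j' ∉ P ++ [pvEev y r j]) := by
        intro j'
        rw [PySem.Set.mem_discard, hact j', List.mem_append, List.mem_singleton,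
            List.mem_append, List.mem_singleton]
        constructor
        · rintro ⟨⟨hr, hs, he⟩, hne⟩
          refine ⟨hr, Or.inl hs, ?_⟩
          rintro (hc | hc)
          · exact he hc
          · have : j' = j := by simpa [pvEev] using congrArg (fun e => e.2.2) hc
            exact hne this
        · rintro ⟨hr, hs | hs, he⟩
          · by_cases hne : j' = j
            · subst hne
              exact absurd (Or.inr rfl) he
            · exact ⟨⟨hr, hs, fun hc => he (Or.inl hc)⟩, hne⟩
          · exact absurd hs.symm (pvEev_ne_sev y r y r j j')
      refine ih (P ++ [pvEev y r j]) _ wa _ hperm' hpw' hact'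
        (PySem.Set.nodup_discard act j hactnd) ?_ ?_ ?_ hknd
      · rw [pvAns_cloudapp p x y r P (e := pvEev y r j) (by simp [pvEev]), hans]
      · intro k
        rw [pvTal_cloudapp p x y r P (e := pvEev y r j) (by simp [pvEev]) k, htal k]
      · intro k
        rw [pvKey_cloudapp p x y r P (e := pvEev y r j) (by simp [pvEev]) k]
        exact hkey k


lemma pvFoldl_last (l : List Int) (a : Int) : l.foldl (fun _ v => v) a = l.getLastD a := by
  induction l generalizing a with
  | nil => rfl
  | cons b t ih => rw [List.foldl_cons, List.getLastD_cons]; exact ih b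

lemma pvInnerB (x y r : List Int) (v : Int) :
    ((PySem.List.pyRange 0 (PySem.List.len y) 1).foldl
      (fun (cl : Int × Int) j =>
        if PySem.List.pyGetD y j 0 - PySem.List.pyGetD r j 0 ≤ v ∧
           v ≤ PySem.List.pyGetD y j 0 + PySem.List.pyGetD r j 0
        then (cl.1 + 1, j) else cl) (0, -1)) =
    (((pvCov y r v).length : Int), (pvCov y r v).getLastD (-1)) := by
  have hsplit : (fun (cl : Int × Int) j =>
      if PySem.List.pyGetD y j 0 - PySem.List.pyGetD r j 0 ≤ v ∧
         v ≤ PySem.List.pyGetD y j 0 + PySem.List.pyGetD r j 0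
      then (cl.1 + 1, j) else cl) =
      (fun (cl : Int × Int) j =>
        ((if PySem.List.pyGetD y j 0 - PySem.List.pyGetD r j 0 ≤ v ∧
             v ≤ PySem.List.pyGetD y j 0 + PySem.List.pyGetD r j 0 then cl.1 + 1 else cl.1),
         (if PySem.List.pyGetD y j 0 - PySem.List.pyGetD r j 0 ≤ v ∧
             v ≤ PySem.List.pyGetD y j 0 + PySem.List.pyGetD r j 0 then j else cl.2))) := by
    funext cl j
    split <;> rfl
  rw [hsplit, PySem.List.foldl_prod_mk
    (f := fun (a : Int) j => if PySem.List.pyGetD y j 0 - PySem.List.pyGetD r j 0 ≤ v ∧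
             v ≤ PySem.List.pyGetD y j 0 + PySem.List.pyGetD r j 0 then a + 1 else a)
    (g := fun (b : Int) j => if PySem.List.pyGetD y j 0 - PySem.List.pyGetD r j 0 ≤ v ∧
             v ≤ PySem.List.pyGetD y j 0 + PySem.List.pyGetD r j 0 then j else b)]
  rw [PySem.List.foldl_ite_add_one
    (p := fun j => PySem.List.pyGetD y j 0 - PySem.List.pyGetD r j 0 ≤ v ∧
             v ≤ PySem.List.pyGetD y j 0 + PySem.List.pyGetD r j 0)]
  rw [PySem.List.foldl_ite_eq_foldl_filter
    (p := fun j => PySem.List.pyGetD y j 0 - PySem.List.pyGetD r j 0 ≤ v ∧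
             v ≤ PySem.List.pyGetD y j 0 + PySem.List.pyGetD r j 0)
    (f := fun (_ : Int) (j : Int) => j)]
  rw [pvFoldl_last]
  unfold pvCov
  rw [List.countP_eq_length_filter]
  simp

lemma pvAnsN_succ (p x y r : List Int) (N : Nat) :
    pvAnsN p x y r ((N : Int) + 1) = pvAnsN p x y r (N : Int) +
      (if pvCov y r (PySem.List.pyGetD x (N : Int) 0) = []
       then PySem.List.pyGetD p (N : Int) 0 else 0) := by
  unfold pvAnsN
  rw [PySem.List.pyRange_one_succ_right (by positivity), List.map_append, List.sum_append]
  simp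

lemma pvTalN_succ (p x y r : List Int) (N : Nat) (k : Int) :
    pvTalN p x y r ((N : Int) + 1) k = pvTalN p x y r (N : Int) k +
      (if pvCov y r (PySem.List.pyGetD x (N : Int) 0) = [k]
       then PySem.List.pyGetD p (N : Int) 0 else 0) := by
  unfold pvTalN
  rw [PySem.List.pyRange_one_succ_right (by positivity), List.map_append, List.sum_append]
  simp

lemma pvFoldB (p x y r : List Int) (N : Nat) :
    (((PySem.List.pyRange 0 (N : Int) 1).foldl (stepB p x y r) (0, PySem.Dict.empty)).1 =
       pvAnsN p x y r (N : Int) ∧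
     (∀ k, ((PySem.List.pyRange 0 (N : Int) 1).foldl (stepB p x y r)
        (0, PySem.Dict.empty)).2.getD k 0 = pvTalN p x y r (N : Int) k) ∧
     (∀ k, k ∈ ((PySem.List.pyRange 0 (N : Int) 1).foldl (stepB p x y r)
        (0, PySem.Dict.empty)).2.keys ↔
        (∃ i, i ∈ PySem.List.pyRange 0 (N : Int) 1 ∧
          pvCov y r (PySem.List.pyGetD x i 0) = [k])) ∧
     ((PySem.List.pyRange 0 (N : Int) 1).foldl (stepB p x y r)
        (0, PySem.Dict.empty)).2.keys.Nodup) := by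
  induction N with
  | zero =>
    rw [show ((0 : Nat) : Int) = 0 from rfl, PySem.List.pyRange_one_eq_nil (by omega)]
    refine ⟨by simp [pvAnsN, PySem.List.pyRange_one_eq_nil], ?_, ?_, ?_⟩
    · intro k
      simp [pvTalN, PySem.List.pyRange_one_eq_nil, PySem.Dict.getD_empty]
    · intro k
      simp [PySem.Dict.keys_empty]
    · simp [PySem.Dict.keys_empty]
  | succ N ih =>
    have hr : PySem.List.pyRange 0 ((N + 1 : Nat) : Int) 1 =
        PySem.List.pyRange 0 (N : Int) 1 ++ [(N : Int)] := by
      push_cast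
      exact PySem.List.pyRange_one_succ_right (by positivity)
    rw [hr]
    rw [List.foldl_append, List.foldl_cons, List.foldl_nil]
    obtain ⟨hans, htal, hkeys, hknd⟩ := ih
    have hcast : ((N + 1 : Nat) : Int) = (N : Int) + 1 := by push_cast; ring
    have hinner := pvInnerB x y r (PySem.List.pyGetD x (N : Int) 0)
    rcases hc0 : (pvCov y r (PySem.List.pyGetD x (N : Int) 0)).length with _ | nc
    · -- not covered
      have hcove : pvCov y r (PySem.List.pyGetD x (N : Int) 0) = [] :=
        List.length_eq_zero_iff.mp hc0
      have hstep : stepB p x y r ((PySem.List.pyRange 0 (N : Int) 1).foldl (stepB p x y r)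
            (0, PySem.Dict.empty)) (N : Int) =
          (((PySem.List.pyRange 0 (N : Int) 1).foldl (stepB p x y r)
              (0, PySem.Dict.empty)).1 + PySem.List.pyGetD p (N : Int) 0,
           ((PySem.List.pyRange 0 (N : Int) 1).foldl (stepB p x y r)
              (0, PySem.Dict.empty)).2) := by
        simp only [stepB, hinner]
        rw [hcove]
        norm_num
      have hst1 : (stepB p x y r ((PySem.List.pyRange 0 (N : Int) 1).foldl (stepB p x y r)
            (0, PySem.Dict.empty)) (N : Int)).1 =
          ((PySem.List.pyRange 0 (N : Int) 1).foldl (stepB p x y r)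
              (0, PySem.Dict.empty)).1 + PySem.List.pyGetD p (N : Int) 0 := by rw [hstep]
      have hst2 : (stepB p x y r ((PySem.List.pyRange 0 (N : Int) 1).foldl (stepB p x y r)
            (0, PySem.Dict.empty)) (N : Int)).2 =
          ((PySem.List.pyRange 0 (N : Int) 1).foldl (stepB p x y r)
              (0, PySem.Dict.empty)).2 := by rw [hstep]
      refine ⟨?_, ?_, ?_, ?_⟩
      · rw [hst1, hcast, pvAnsN_succ, if_pos hcove, hans]
      · intro k
        rw [hst2, hcast, pvTalN_succ, htal k, hcove]
        simp
      · intro k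
        rw [hst2, hkeys k]
        constructor
        · rintro ⟨i, hi, hcov⟩
          exact ⟨i, List.mem_append.mpr (Or.inl hi), hcov⟩
        · rintro ⟨i, hi, hcov⟩
          rcases List.mem_append.mp hi with h | h
          · exact ⟨i, h, hcov⟩
          · rw [List.mem_singleton] at h
            subst h
            rw [hcove] at hcov
            exact absurd hcov (by simp)
      · rw [hst2]
        exact hknd
    · rcases nc with _ | nc2
      · -- exactly one cloud
        rcases List.length_eq_one_iff.mp hc0 with ⟨k0, hcove⟩
        have hstep : stepB p x y r ((PySem.List.pyRange 0 (N : Int) 1).foldl (stepB p x y r)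
              (0, PySem.Dict.empty)) (N : Int) =
            (((PySem.List.pyRange 0 (N : Int) 1).foldl (stepB p x y r)
                (0, PySem.Dict.empty)).1,
             ((PySem.List.pyRange 0 (N : Int) 1).foldl (stepB p x y r)
                (0, PySem.Dict.empty)).2.insert k0
               (((PySem.List.pyRange 0 (N : Int) 1).foldl (stepB p x y r)
                  (0, PySem.Dict.empty)).2.getD k0 0 + PySem.List.pyGetD p (N : Int) 0)) := by
          simp only [stepB, hinner]
          rw [hcove]
          norm_num
        have hst1 : (stepB p x y r ((PySem.List.pyRange 0 (N : Int) 1).foldl (stepB p x y r)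
              (0, PySem.Dict.empty)) (N : Int)).1 =
            ((PySem.List.pyRange 0 (N : Int) 1).foldl (stepB p x y r)
                (0, PySem.Dict.empty)).1 := by rw [hstep]
        have hst2 : (stepB p x y r ((PySem.List.pyRange 0 (N : Int) 1).foldl (stepB p x y r)
              (0, PySem.Dict.empty)) (N : Int)).2 =
            ((PySem.List.pyRange 0 (N : Int) 1).foldl (stepB p x y r)
                (0, PySem.Dict.empty)).2.insert k0
               (((PySem.List.pyRange 0 (N : Int) 1).foldl (stepB p x y r)
                  (0, PySem.Dict.empty)).2.getD k0 0 + PySem.List.pyGetD p (N : Int) 0) := by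
          rw [hstep]
        refine ⟨?_, ?_, ?_, ?_⟩
        · rw [hst1, hcast, pvAnsN_succ, if_neg (by rw [hcove]; simp), hans]
          ring
        · intro k
          rw [hst2, hcast, pvTalN_succ]
          by_cases hk : k = k0
          · subst hk
            rw [PySem.Dict.getD_insert_self, htal k, hcove]
            simp
          · rw [PySem.Dict.getD_insert_of_ne _ _ _ hk, htal k, hcove]
            have hns : ¬([k0] = [k]) := by
              intro h
              injection h with h1 _
              exact hk h1.symm
            simp [hns]
        · intro k
          rw [hst2, PySem.Dict.mem_keys_insert, hkeys k]
          constructor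
          · rintro (rfl | ⟨i, hi, hcov⟩)
            · exact ⟨(N : Int), List.mem_append.mpr (Or.inr (by simp)), hcove⟩
            · exact ⟨i, List.mem_append.mpr (Or.inl hi), hcov⟩
          · rintro ⟨i, hi, hcov⟩
            rcases List.mem_append.mp hi with h | h
            · exact Or.inr ⟨i, h, hcov⟩
            · rw [List.mem_singleton] at h
              subst h
              rw [hcove] at hcov
              injection hcov with h1 _
              exact Or.inl h1.symm
        · rw [hst2]
          exact PySem.Dict.nodup_keys_insert _ _ _ hknd
      · -- two or more
        have hne0 : pvCov y r (PySem.List.pyGetD x (N : Int) 0) ≠ [] := by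
          intro hc; rw [hc] at hc0; simp at hc0
        have hne1 : ∀ k : Int, pvCov y r (PySem.List.pyGetD x (N : Int) 0) ≠ [k] := by
          intro k hc; rw [hc] at hc0; simp at hc0
        have hstep : stepB p x y r ((PySem.List.pyRange 0 (N : Int) 1).foldl (stepB p x y r)
              (0, PySem.Dict.empty)) (N : Int) =
            (PySem.List.pyRange 0 (N : Int) 1).foldl (stepB p x y r)
              (0, PySem.Dict.empty) := by
          have h1 : ((pvCov y r (PySem.List.pyGetD x (N : Int) 0)).length : Int) ≠ 0 := by
            rw [hc0]; push_cast; omega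
          have h2 : ((pvCov y r (PySem.List.pyGetD x (N : Int) 0)).length : Int) ≠ 1 := by
            rw [hc0]; push_cast; omega
          simp only [stepB, hinner]
          rw [if_neg h1, if_neg h2]
        rw [hstep]
        refine ⟨?_, ?_, ?_, hknd⟩
        · rw [hcast, pvAnsN_succ, if_neg hne0, hans]
          ring
        · intro k
          rw [hcast, pvTalN_succ, if_neg (hne1 k), htal k]
          ring
        · intro k
          rw [hkeys k]
          constructor
          · rintro ⟨i, hi, hcov⟩
            exact ⟨i, List.mem_append.mpr (Or.inl hi), hcov⟩
          · rintro ⟨i, hi, hcov⟩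
            rcases List.mem_append.mp hi with h | h
            · exact ⟨i, h, hcov⟩
            · rw [List.mem_singleton] at h
              subst h
              exact absurd hcov (hne1 k)

lemma pvEvents_eq (p x y r : List Int) :
    (PySem.List.pyRange 0 (PySem.List.len y) 1).foldl
      (fun acc i => (acc ++ [(PySem.List.pyGetD y i 0 - PySem.List.pyGetD r i 0, (-1 : Int), i)]) ++
        [(PySem.List.pyGetD y i 0 + PySem.List.pyGetD r i 0, (1 : Int), i)])
      ((PySem.List.pyRange 0 (PySem.List.len p) 1).foldl
        (fun acc i => acc ++ [(PySem.List.pyGetD x i 0, (0 : Int), i)]) []) = pvE0 p x y r := by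
  have h1 : (PySem.List.pyRange 0 (PySem.List.len p) 1).foldl
      (fun acc i => acc ++ [(PySem.List.pyGetD x i 0, (0 : Int), i)]) [] =
      (PySem.List.pyRange 0 (PySem.List.len p) 1).map (pvPev x) := by
    rw [PySem.List.foldl_congr_mem _ _ (fun acc i => acc ++ [pvPev x i]) _
      (by intro acc i _; simp [pvPev])]
    rw [PySem.List.foldl_append_singleton_eq_map (f := pvPev x)]
    simp
  rw [h1]
  rw [PySem.List.foldl_congr_mem _ _
    (fun acc i => acc ++ [pvSev y r i, pvEev y r i]) _ ?_]
  · rw [PySem.List.foldl_append_eq_flatMap (g := fun i => [pvSev y r i, pvEev y r i])]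
    rfl
  · intro acc i _
    simp [pvSev, pvEev]

lemma pvAns_full (p x y r : List Int) (S : List (Int × Int × Int))
    (hS : ∀ i ∈ PySem.List.pyRange 0 (PySem.List.len p) 1, pvPev x i ∈ S) :
    pvAns p x y r S = pvAnsN p x y r (PySem.List.len p) := by
  unfold pvAns pvAnsN
  refine congrArg _ (List.map_congr_left ?_)
  intro i hi
  simp [hS i hi]

lemma pvTal_full (p x y r : List Int) (S : List (Int × Int × Int))
    (hS : ∀ i ∈ PySem.List.pyRange 0 (PySem.List.len p) 1, pvPev x i ∈ S) (k : Int) :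
    pvTal p x y r S k = pvTalN p x y r (PySem.List.len p) k := by
  unfold pvTal pvTalN
  refine congrArg _ (List.map_congr_left ?_)
  intro i hi
  simp [hS i hi]

lemma pvKey_full (p x y r : List Int) (S : List (Int × Int × Int))
    (hS : ∀ i ∈ PySem.List.pyRange 0 (PySem.List.len p) 1, pvPev x i ∈ S) (k : Int) :
    pvKey p x y r S k ↔ (∃ i, i ∈ PySem.List.pyRange 0 (PySem.List.len p) 1 ∧
      pvCov y r (PySem.List.pyGetD x i 0) = [k]) := by
  unfold pvKey
  constructor
  · rintro ⟨i, hi, _, hcov⟩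
    exact ⟨i, hi, hcov⟩
  · rintro ⟨i, hi, hcov⟩
    exact ⟨i, hi, hS i hi, hcov⟩

lemma pvFoldMax_perm (l1 l2 : List Int) (h : l1.Perm l2) (a : Int) :
    l1.foldl max a = l2.foldl max a :=
  List.Perm.foldl_eq (rcomm := ⟨fun b u v => max_right_comm b u v⟩) h a

theorem maximumPeople_spec : Claim_equal_maximumPeople := by
  unfold Claim_equal_maximumPeople Spec_maximumPeople
  intro p x y r _ hpre
  obtain ⟨hlx, hlr, hr0⟩ := hpre
  have hsr : ∀ j ∈ PySem.List.pyRange 0 (PySem.List.len y) 1, 0 ≤ PySem.List.pyGetD r j 0 := by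
    intro j hj
    rw [PySem.List.mem_pyRange_one] at hj
    have hjy : j.toNat < y.length := by
      simp only [PySem.List.len] at hj
      omega
    have hjr : j.toNat < r.length := lt_of_lt_of_le hjy hlr
    rw [PySem.List.pyGetD_eq_getElem r 0 hj.1 (by simp only [PySem.List.len] at hj ⊢; omega)]
    have hlen2 : j.toNat < (r.take y.length).length := by
      rw [List.length_take]
      omega
    have heq : (r.take y.length)[j.toNat] = r[j.toNat] := List.getElem_take
    have hmem := List.getElem_mem hlen2
    rw [heq] at hmem
    exact hr0 _ hmem
  simp only [maximumPeople, maximumPeople_alt]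
  rw [pvEvents_eq p x y r]
  have hS : ∀ i ∈ PySem.List.pyRange 0 (PySem.List.len p) 1,
      pvPev x i ∈ PySem.List.sorted2 (pvE0 p x y r) (fun e => e.1) (fun e => e.2.1) := by
    intro i hi
    exact (PySem.List.sorted2_perm _ _ _ _).mem_iff.mpr (pvPev_mem_E0 p x y r hi)
  have hA := pvFoldA p x y r hsr
    (PySem.List.sorted2 (pvE0 p x y r) (fun e => e.1) (fun e => e.2.1)) [] [] PySem.Dict.empty 0
    (by simpa using PySem.List.sorted2_perm (pvE0 p x y r) (fun e => e.1) (fun e => e.2.1) false)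
    (by simpa using pvSorted2_pairwise (pvE0 p x y r))
    (by intro j; simp)
    (by simp)
    (by unfold pvAns; simp)
    (by intro k; unfold pvTal; simp [PySem.Dict.getD_empty])
    (by intro k; unfold pvKey; simp [PySem.Dict.keys_empty])
    (by simp [PySem.Dict.keys_empty])
  rw [List.nil_append] at hA
  obtain ⟨hansA, htalA, hkeyA, hkndA⟩ := hA
  have hB := pvFoldB p x y r p.length
  have hcastp : ((p.length : Nat) : Int) = PySem.List.len p := rfl
  rw [hcastp] at hB
  obtain ⟨hansB, htalB, hkeyB, hkndB⟩ := hB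
  -- the two answers agree
  have hansEq : (List.foldl (stepA p) ([], PySem.Dict.empty, 0)
      (PySem.List.sorted2 (pvE0 p x y r) (fun e => e.1) (fun e => e.2.1))).2.2 =
      (List.foldl (stepB p x y r) (0, PySem.Dict.empty)
        (PySem.List.pyRange 0 (PySem.List.len p) 1)).1 := by
    rw [hansA, hansB, pvAns_full p x y r _ hS]
  -- the dictionaries have permuted key lists and identical value functions
  have hkperm : (List.foldl (stepA p) ([], PySem.Dict.empty, 0)
      (PySem.List.sorted2 (pvE0 p x y r) (fun e => e.1) (fun e => e.2.1))).2.1.keys.Perm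
      (List.foldl (stepB p x y r) (0, PySem.Dict.empty)
        (PySem.List.pyRange 0 (PySem.List.len p) 1)).2.keys := by
    rw [List.perm_ext_iff_of_nodup hkndA hkndB]
    intro k
    rw [hkeyA k, hkeyB k, pvKey_full p x y r _ hS k]
  have hvalsA : (List.foldl (stepA p) ([], PySem.Dict.empty, 0)
      (PySem.List.sorted2 (pvE0 p x y r) (fun e => e.1) (fun e => e.2.1))).2.1.values =
      (List.foldl (stepA p) ([], PySem.Dict.empty, 0)
      (PySem.List.sorted2 (pvE0 p x y r) (fun e => e.1) (fun e => e.2.1))).2.1.keys.map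
        (fun k => pvTalN p x y r (PySem.List.len p) k) := by
    rw [PySem.Dict.values_eq_map_keys _ hkndA 0]
    refine List.map_congr_left ?_
    intro k _
    rw [htalA k, pvTal_full p x y r _ hS k]
  have hvalsB : (List.foldl (stepB p x y r) (0, PySem.Dict.empty)
      (PySem.List.pyRange 0 (PySem.List.len p) 1)).2.values =
      (List.foldl (stepB p x y r) (0, PySem.Dict.empty)
        (PySem.List.pyRange 0 (PySem.List.len p) 1)).2.keys.map
        (fun k => pvTalN p x y r (PySem.List.len p) k) := by
    rw [PySem.Dict.values_eq_map_keys _ hkndB 0]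
    refine List.map_congr_left ?_
    intro k _
    rw [htalB k]
  have hvperm : (List.foldl (stepA p) ([], PySem.Dict.empty, 0)
      (PySem.List.sorted2 (pvE0 p x y r) (fun e => e.1) (fun e => e.2.1))).2.1.values.Perm
      (List.foldl (stepB p x y r) (0, PySem.Dict.empty)
        (PySem.List.pyRange 0 (PySem.List.len p) 1)).2.values := by
    rw [hvalsA, hvalsB]
    exact hkperm.map _
  have hstep_eq : (fun (mx v : Int) => if v > mx then v else mx) =
      (fun (mx v : Int) => max mx v) := by
    funext mx v
    by_cases h : mx < v
    · rw [if_pos h, max_eq_right h.le]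
    · rw [if_neg h, max_eq_left (not_lt.mp h)]
  rw [hstep_eq, PySem.List.max?_id_cons, Option.getD_some, hansEq,
    pvFoldMax_perm _ _ hvperm 0]
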